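-- pv_equiv track=rewrite | github.com/AlphaBravo227/CrewOps360 | modules/pdf_generator.py | count_shifts_by_pay_period_comprehensive
-- ===== SOURCE A (Python) =====
-- def count_shifts_by_pay_period_comprehensive(track_data, days_list, preassignments=None):
--     """
--     FIXED: Count shifts by pay period including AT assignments
--
--     Args:
--         track_data (dict): Dictionary of day -> assignment
--         days_list (list): Ordered list of days
--         preassignments (dict, optional): Dictionary of day -> preassignment value
--
--     Returns:
--         list: Number of shifts in each pay period (14-day blocks)
--     """
--     shifts_by_pay_period = []
--
--     # Process in 14-day blocks (pay periods)
--     for i in range(0, len(days_list), 14):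
--         pay_period_days = days_list[i:i+14] if i+14 <= len(days_list) else days_list[i:]
--
--         pay_period_count = 0
--         for day in pay_period_days:
--             assignment = None
--
--             # Check track_data first, then preassignments
--             if day in track_data and track_data[day]:
--                 assignment = track_data[day]
--             elif preassignments and day in preassignments and preassignments[day]:
--                 assignment = preassignments[day]
--
--             # Count all shift types (D, N, AT)
--             if assignment in ["D", "N", "AT"]:
--                 pay_period_count += 1
--
--         shifts_by_pay_period.append(pay_period_count)
--
--     return shifts_by_pay_period
-- ===== SOURCE B (Python) =====
-- def count_shifts_by_pay_period_comprehensive(track_data, days_list, preassignments=None):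
--     result = []
--     for idx, day in enumerate(days_list):
--         if idx // 14 == len(result):
--             result.append(0)
--         assignment = track_data.get(day) or (preassignments or {}).get(day)
--         if assignment in ("D", "N", "AT"):
--             result[idx // 14] += 1
--     return result
-- ===== Notes on version B (the rewrite author's own statement) =====
-- stated objective: simpler
-- what changed: Replaced the nested loop over explicit 14-day slices with a single flat enumerate pass that buckets each day by idx // 14, appending a new zero bucket at each pay-period boundary.
import Mathlib
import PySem

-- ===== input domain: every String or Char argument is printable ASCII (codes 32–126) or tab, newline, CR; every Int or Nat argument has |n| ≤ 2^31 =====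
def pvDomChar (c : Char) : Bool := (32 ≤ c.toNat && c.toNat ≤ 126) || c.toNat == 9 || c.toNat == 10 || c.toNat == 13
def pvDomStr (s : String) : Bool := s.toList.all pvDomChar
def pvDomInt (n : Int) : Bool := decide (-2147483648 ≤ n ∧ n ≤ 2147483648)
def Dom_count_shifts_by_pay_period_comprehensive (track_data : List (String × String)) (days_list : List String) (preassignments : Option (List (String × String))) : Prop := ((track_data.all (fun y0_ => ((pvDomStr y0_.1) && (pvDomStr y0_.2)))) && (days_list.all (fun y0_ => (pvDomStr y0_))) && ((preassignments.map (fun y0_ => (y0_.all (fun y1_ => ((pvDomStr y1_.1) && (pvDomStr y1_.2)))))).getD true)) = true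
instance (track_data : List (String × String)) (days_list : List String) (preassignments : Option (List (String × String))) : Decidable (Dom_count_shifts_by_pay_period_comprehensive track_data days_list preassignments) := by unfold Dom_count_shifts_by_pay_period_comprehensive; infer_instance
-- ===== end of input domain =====

-- header: B replaces A's 14-day block slicing with one flat enumerate pass bucketed by idx // 14 (objective: simpler decomposition, same cost)

-- ===== PORT A =====
-- A's `preassignments and day in preassignments and preassignments[day]` elif branch
def pvPreAssignA (pre : Option (List (String × String))) (day : String) : Option String :=
  match pre with
  | none => none
  | some p =>
      if p = [] then none
      else
        match (PySem.Dict.mk p).get? day with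
        | some w => if w ≠ "" then some w else none
        | none => none

-- A's `if day in track_data and track_data[day]: ... elif ...` assignment computation
def pvAssignA (track_data : List (String × String)) (pre : Option (List (String × String))) (day : String) : Option String :=
  match (PySem.Dict.mk track_data).get? day with
  | some v => if v ≠ "" then some v else pvPreAssignA pre day
  | none => pvPreAssignA pre day

-- `assignment in ["D", "N", "AT"]`
def pvIsShift (a : Option String) : Bool :=
  a == some "D" || a == some "N" || a == some "AT"

-- the inner `for day in pay_period_days` loop of A
def pvBlockCount (track_data : List (String × String)) (pre : Option (List (String × String))) (block : List String) : Int :=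
  block.foldl (fun c day =>
    let assignment := pvAssignA track_data pre day
    if pvIsShift assignment then c + 1 else c) 0

-- the outer `for i in range(0, len(days_list), 14)` loop of A, as recursion on i
def pvAGo (track_data : List (String × String)) (pre : Option (List (String × String)))
    (days_list : List String) (i : Nat) (acc : List Int) : List Int :=
  if i < days_list.length then
    let block :=
      if i + 14 ≤ days_list.length then
        PySem.List.slice days_list (some (i : Int)) (some ((i : Int) + 14))
      else
        PySem.List.slice days_list (some (i : Int)) none
    pvAGo track_data pre days_list (i + 14) (acc ++ [pvBlockCount track_data pre block])
  else acc
termination_by days_list.length - i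

def count_shifts_by_pay_period_comprehensive (track_data : List (String × String)) (days_list : List String) (preassignments : Option (List (String × String))) : List Int :=
  pvAGo track_data preassignments days_list 0 []

-- ===== PORT B =====
-- B's `track_data.get(day) or (preassignments or {}).get(day)`
def pvAssignB (track_data : List (String × String)) (pre : Option (List (String × String))) (day : String) : Option String :=
  match (PySem.Dict.mk track_data).get? day with
  | some v => if v = "" then (PySem.Dict.mk (pre.getD [])).get? day else some v
  | none => (PySem.Dict.mk (pre.getD [])).get? day

-- B's `for idx, day in enumerate(days_list)` loop; `result[idx // 14] += 1` as getD + set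
-- (the index idx / 14 is always in range, so getD/set are exact)
def pvBGo (track_data : List (String × String)) (pre : Option (List (String × String))) :
    List String → Nat → List Int → List Int
  | [], _, result => result
  | day :: rest, idx, result =>
      let result := if idx / 14 == result.length then result ++ [0] else result
      let assignment := pvAssignB track_data pre day
      let result :=
        if pvIsShift assignment then
          result.set (idx / 14) (result.getD (idx / 14) 0 + 1)
        else result
      pvBGo track_data pre rest (idx + 1) result

def count_shifts_by_pay_period_comprehensive_alt (track_data : List (String × String)) (days_list : List String) (preassignments : Option (List (String × String))) : List Int :=
  pvBGo track_data preassignments days_list 0 []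

-- ===== PRECONDITION & SPEC =====
def Spec_count_shifts_by_pay_period_comprehensive (track_data : List (String × String)) (days_list : List String) (preassignments : Option (List (String × String))) (out : List Int) : Prop := out = count_shifts_by_pay_period_comprehensive_alt track_data days_list preassignments
instance (track_data : List (String × String)) (days_list : List String) (preassignments : Option (List (String × String))) (out : List Int) : Decidable (Spec_count_shifts_by_pay_period_comprehensive track_data days_list preassignments out) := by unfold Spec_count_shifts_by_pay_period_comprehensive; infer_instance

-- ===== CLAIM (what is proved, stated in full; the proofs are below) =====
def Claim_equal_count_shifts_by_pay_period_comprehensive : Prop := ∀ (track_data : List (String × String)) (days_list : List String) (preassignments : Option (List (String × String))), Dom_count_shifts_by_pay_period_comprehensive track_data days_list preassignments → Spec_count_shifts_by_pay_period_comprehensive track_data days_list preassignments (count_shifts_by_pay_period_comprehensive track_data days_list preassignments)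

-- ===== LEMMAS AND PROOFS =====

-- counting step with B's shift predicate
def pvStep (f : String → Bool) (c : Int) (d : String) : Int := if f d then c + 1 else c

-- reference run: current bucket value c, j elements of the current 14-day block consumed
def pvSpecRun (f : String → Bool) (c : Int) (j : Nat) : List String → List Int
  | [] => [c]
  | d :: rest =>
      if j + 1 = 14 then
        match rest with
        | [] => [pvStep f c d]
        | _ :: _ => pvStep f c d :: pvSpecRun f 0 0 rest
      else pvSpecRun f (pvStep f c d) (j + 1) rest

-- A's and B's assignment chains give the same shift test
theorem pvIsShift_assign_eq (td : List (String × String)) (pre : Option (List (String × String))) (day : String) :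
    pvIsShift (pvAssignA td pre day) = pvIsShift (pvAssignB td pre day) := by
  have hfall : ∀ (a : Option String),
      pvIsShift (match a with
        | some w => if w ≠ "" then some w else none
        | none => none) = pvIsShift a := by
    intro a
    cases a with
    | none => rfl
    | some w =>
      by_cases hw : w = ""
      · subst hw; decide
      · simp [hw]
  have hpre : pvIsShift (pvPreAssignA pre day) =
      pvIsShift ((PySem.Dict.mk (pre.getD [])).get? day) := by
    cases pre with
    | none => rfl
    | some p =>
      by_cases hp : p = []
      · subst hp; simp [pvPreAssignA]; rfl
      · simpa [pvPreAssignA, hp, Option.getD] using hfall ((PySem.Dict.mk p).get? day)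
  unfold pvAssignA pvAssignB
  cases h1 : (PySem.Dict.mk td).get? day with
  | none => simpa using hpre
  | some v =>
    by_cases hv : v = ""
    · simpa [hv] using hpre
    · simp [hv]

-- pvSpecRun peels off the first k elements of the current block (j = 14 - k consumed)
theorem pvSpecRun_blocks (f : String → Bool) :
    ∀ (l : List String) (c : Int) (k : Nat), 1 ≤ k → k ≤ 14 →
      pvSpecRun f c (14 - k) l =
        (l.take k).foldl (pvStep f) c ::
          (if l.length ≤ k then [] else pvSpecRun f 0 0 (l.drop k)) := by
  intro l
  induction l with
  | nil => intro c k h1 h14; simp [pvSpecRun]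
  | cons d rest ih =>
    intro c k h1 h14
    by_cases hk : k = 1
    · subst hk
      have hj : 14 - 1 + 1 = 14 := by omega
      cases rest with
      | nil => simp [pvSpecRun, hj]
      | cons e rest' => simp [pvSpecRun, hj]
    · obtain ⟨k', rfl⟩ : ∃ k', k = k' + 1 := ⟨k - 1, by omega⟩
      have hj : ¬ (14 - (k' + 1) + 1 = 14) := by omega
      have hk1 : 14 - (k' + 1) + 1 = 14 - k' := by omega
      rw [show pvSpecRun f c (14 - (k' + 1)) (d :: rest) =
            pvSpecRun f (pvStep f c d) (14 - (k' + 1) + 1) rest by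
            simp [pvSpecRun]
            intro h
            exact absurd h (by omega)]
      rw [hk1, ih (pvStep f c d) k' (by omega) (by omega)]
      simp only [List.take_succ_cons, List.foldl_cons, List.drop_succ_cons, List.length_cons]
      congr 1
      simp
  
theorem pvAGo_eq (td : List (String × String)) (pre : Option (List (String × String)))
    (days : List String) :
    ∀ (m i : Nat) (acc : List Int), days.length - i ≤ m →
      pvAGo td pre days i acc =
        acc ++ (if i < days.length then
          pvSpecRun (fun d => pvIsShift (pvAssignB td pre d)) 0 0 (days.drop i) else []) := by
  intro m
  induction m with
  | zero =>
    intro i acc h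
    have : ¬ i < days.length := by omega
    rw [pvAGo]
    simp [this]
  | succ m ih =>
    intro i acc h
    by_cases hi : i < days.length
    · rw [pvAGo]
      have hblock : (if i + 14 ≤ days.length then
            PySem.List.slice days (some (i : Int)) (some ((i : Int) + 14))
          else PySem.List.slice days (some (i : Int)) none) = (days.drop i).take 14 := by
        by_cases h14 : i + 14 ≤ days.length
        · have := PySem.List.slice_natCast_add days i 14
          push_cast at this
          simp [h14, this]
        · have hlen : (days.drop i).length ≤ 14 := by simp; omega
          simp [h14, PySem.List.slice_from_natCast, List.take_of_length_le hlen]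
      have hcnt : pvBlockCount td pre ((days.drop i).take 14) =
          ((days.drop i).take 14).foldl (pvStep (fun d => pvIsShift (pvAssignB td pre d))) 0 := by
        unfold pvBlockCount pvStep
        congr 1
        funext c day
        simp only [pvIsShift_assign_eq]
      simp only [hi, if_pos, hblock]
      rw [ih (i + 14) (acc ++ [pvBlockCount td pre ((days.drop i).take 14)]) (by omega)]
      have hspec := pvSpecRun_blocks (fun d => pvIsShift (pvAssignB td pre d)) (days.drop i) 0 14
        (by omega) (by omega)
      simp only [Nat.sub_self] at hspec
      rw [hspec, hcnt]
      have hdd : (days.drop i).drop 14 = days.drop (i + 14) := by simp [List.drop_drop]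
      have hll : (days.drop i).length = days.length - i := by simp
      by_cases h14 : i + 14 < days.length
      · have : ¬ (days.drop i).length ≤ 14 := by omega
        simp [h14, hdd]
        exact fun h' => absurd h' (by omega)
      · have : (days.drop i).length ≤ 14 := by omega
        simp [h14]
        exact fun h' => absurd h' (by omega)
    · rw [pvAGo]
      simp [hi]

theorem pvBGo_mid (td : List (String × String)) (pre : Option (List (String × String))) :
    ∀ (n : Nat) (rest : List String), rest.length ≤ n →
      ∀ (acc : List Int) (c : Int) (j : Nat), j < 14 →
        pvBGo td pre rest (14 * acc.length + j) (acc ++ [c]) =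
          acc ++ pvSpecRun (fun d => pvIsShift (pvAssignB td pre d)) c j rest := by
  intro n
  induction n with
  | zero =>
    intro rest hrest acc c j hj
    have : rest = [] := by cases rest <;> simp_all
    subst this
    simp [pvBGo, pvSpecRun]
  | succ n ih =>
    intro rest hrest acc c j hj
    cases rest with
    | nil => simp [pvBGo, pvSpecRun]
    | cons d rest' =>
      have hdiv : (14 * acc.length + j) / 14 = acc.length := by omega
      have hne : ((14 * acc.length + j) / 14 == (acc ++ [c]).length) = false := by
        simp [List.length_append]; omega
      have hstate : ∀ b : Bool,
          (if b then (acc ++ [c]).set ((14 * acc.length + j) / 14)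
              ((acc ++ [c]).getD ((14 * acc.length + j) / 14) 0 + 1)
           else acc ++ [c]) = acc ++ [if b then c + 1 else c] := by
        intro b
        cases b
        · simp
        · simp only [if_pos, hdiv]
          have hg : (acc ++ [c]).getD acc.length 0 = c := by simp [List.getD]
          rw [hg]
          simp
      rw [show pvBGo td pre (d :: rest') (14 * acc.length + j) (acc ++ [c]) =
            pvBGo td pre rest' (14 * acc.length + j + 1)
              (acc ++ [if pvIsShift (pvAssignB td pre d) then c + 1 else c]) by
          simp only [pvBGo, hne, Bool.false_eq_true, if_false]
          rw [hstate]]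
      set c' := if pvIsShift (pvAssignB td pre d) then c + 1 else c with hc'
      by_cases hj14 : j + 1 = 14
      · cases rest' with
        | nil =>
          simp [pvBGo, pvSpecRun, hj14, pvStep, ← hc']
        | cons e rest'' =>
          have hidx : 14 * acc.length + j + 1 = 14 * (acc ++ [c']).length := by
            simp [List.length_append]; omega
          have heq : ((14 * (acc ++ [c']).length) / 14 == (acc ++ [c']).length) = true := by
            simp
          have hg0 : ((acc ++ [c']) ++ [(0:Int)]).getD ((14 * (acc ++ [c']).length) / 14) 0 = 0 := by
            have : (14 * (acc ++ [c']).length) / 14 = (acc ++ [c']).length := by omega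
            rw [this]
            simp [List.getD]
          have hstate2 : ∀ b : Bool,
              (if b then ((acc ++ [c']) ++ [(0:Int)]).set ((14 * (acc ++ [c']).length) / 14)
                  (((acc ++ [c']) ++ [(0:Int)]).getD ((14 * (acc ++ [c']).length) / 14) 0 + 1)
               else (acc ++ [c']) ++ [(0:Int)]) = (acc ++ [c']) ++ [if b then (1:Int) else 0] := by
            intro b
            cases b
            · simp
            · rw [if_pos rfl, hg0]
              have : (14 * (acc ++ [c']).length) / 14 = (acc ++ [c']).length := by omega
              rw [this]
              simp
          rw [hidx]
          rw [show pvBGo td pre (e :: rest'') (14 * (acc ++ [c']).length) (acc ++ [c']) =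
                pvBGo td pre rest'' (14 * (acc ++ [c']).length + 1)
                  ((acc ++ [c']) ++ [if pvIsShift (pvAssignB td pre e) then (1:Int) else 0]) by
              simp only [pvBGo, heq, if_pos]
              rw [hstate2]]
          rw [ih rest'' (by simp at hrest ⊢; omega) (acc ++ [c'])
            (if pvIsShift (pvAssignB td pre e) then (1:Int) else 0) 1 (by omega)]
          have h01 : (if pvIsShift (pvAssignB td pre e) then (1:Int) else 0) =
              pvStep (fun d => pvIsShift (pvAssignB td pre d)) 0 e := by
            simp [pvStep]
          rw [h01]
          simp only [pvSpecRun, hj14, if_pos]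
          have h1 : ¬ ((0:Nat) + 1 = 14) := by omega
          simp [h1, pvStep, ← hc', List.append_assoc]
      · rw [show 14 * acc.length + j + 1 = 14 * acc.length + (j + 1) by omega]
        rw [ih rest' (by simp at hrest ⊢; omega) acc c' (j + 1) (by omega)]
        simp [pvSpecRun, hj14, pvStep, ← hc']

-- ===== VERDICT (by name: the statement is the Claim_ definition above) =====
theorem count_shifts_by_pay_period_comprehensive_spec : Claim_equal_count_shifts_by_pay_period_comprehensive := by
  intro td days pre _
  unfold Spec_count_shifts_by_pay_period_comprehensive
  unfold count_shifts_by_pay_period_comprehensive count_shifts_by_pay_period_comprehensive_alt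
  rw [pvAGo_eq td pre days days.length 0 [] (by omega)]
  cases days with
  | nil => simp [pvBGo]
  | cons d ds =>
    rw [show pvBGo td pre (d :: ds) 0 [] =
          pvBGo td pre ds 1 [if pvIsShift (pvAssignB td pre d) then (1:Int) else 0] by
        cases hfd : pvIsShift (pvAssignB td pre d) <;> simp [pvBGo, hfd, List.getD]]
    have := pvBGo_mid td pre ds.length ds (by omega) []
      (if pvIsShift (pvAssignB td pre d) then (1:Int) else 0) 1 (by omega)
    simp only [List.length_nil, Nat.mul_zero, Nat.zero_add, List.nil_append] at this
    rw [this]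
    have h1 : ¬ ((0:Nat) + 1 = 14) := by omega
    simp [pvSpecRun, h1, pvStep, List.length_cons]
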